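-- pv_equiv track=rewrite | github.com/NM-Labs/ChatBot | Script/chatESC.py | contar_puntos
-- ===== SOURCE A (Python) =====
-- def contar_puntos(entrada):
--   p = 0
--   h = []
--   for i in entrada:
--     o = i.count('.')
--     if o == 1:
--       p += 1
--       if p == 5:
--         break
--     h.append(i)
--   h.append('.')
--   return h
-- ===== SOURCE B (Python) =====
-- def contar_puntos(entrada):
--   items = list(entrada)
--   dots = [idx for idx, i in enumerate(items) if i.count('.') == 1]
--   cut = dots[4] if len(dots) >= 5 else len(items)
--   return items[:cut] + ['.']
-- ===== Notes on version B (the rewrite author's own statement) =====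
-- stated objective: alternative
-- what changed: Replaces the stateful accumulate-and-break loop (counter p, growing list h) with an index-then-slice decomposition: collect the positions of all single-dot elements by a comprehension, cut at the 5th such position (or the end), and return a slice plus the trailing dot.
import Mathlib
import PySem

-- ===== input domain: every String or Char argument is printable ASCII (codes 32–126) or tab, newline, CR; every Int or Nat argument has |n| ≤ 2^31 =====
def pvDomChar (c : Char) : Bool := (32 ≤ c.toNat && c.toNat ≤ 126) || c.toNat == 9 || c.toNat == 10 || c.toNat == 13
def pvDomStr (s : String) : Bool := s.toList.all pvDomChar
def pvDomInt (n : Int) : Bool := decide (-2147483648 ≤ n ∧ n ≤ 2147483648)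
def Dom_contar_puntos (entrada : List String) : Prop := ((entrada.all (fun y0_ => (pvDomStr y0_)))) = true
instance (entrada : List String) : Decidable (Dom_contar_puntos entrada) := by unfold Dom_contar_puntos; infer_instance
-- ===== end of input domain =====

-- B replaces A's accumulate-and-break loop by an index-then-slice decomposition (alternative, same cost).


-- ===== PORT A =====
-- the for-loop with its break: state (p, h), element by element
def cpLoop : List String → Int → List String → List String
  | [], _, h => h ++ ["."]
  | i :: rest, p, h =>
    let o : Nat := PySem.Str.count i "."
    if o = 1 then
      if p + 1 = 5 then h ++ ["."]
      else cpLoop rest (p + 1) (h ++ [i])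
    else cpLoop rest p (h ++ [i])

def contar_puntos (entrada : List String) : List String :=
  cpLoop entrada 0 []

-- ===== PORT B =====
def contar_puntos_alt (entrada : List String) : List String :=
  let items := entrada
  let dots : List Int :=
    ((PySem.List.enumerate items 0).filter (fun q => PySem.Str.count q.2 "." = 1)).map Prod.fst
  let cut : Int := if 5 ≤ dots.length then dots.getD 4 0 else (items.length : Int)
  PySem.List.slice items none (some cut) ++ ["."]

-- ===== PRECONDITION & SPEC =====
def Spec_contar_puntos (entrada : List String) (out : List String) : Prop := out = contar_puntos_alt entrada
instance (entrada : List String) (out : List String) : Decidable (Spec_contar_puntos entrada out) := by unfold Spec_contar_puntos; infer_instance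

-- ===== CLAIM (what is proved, stated in full; the proofs are below) =====
def Claim_equal_contar_puntos : Prop := ∀ (entrada : List String), Dom_contar_puntos entrada → Spec_contar_puntos entrada (contar_puntos entrada)

-- ===== LEMMAS AND PROOFS =====

-- number of elements strictly before the n-th single-dot element (whole list if fewer than n)
def cpCut : Nat → List String → Nat
  | _, [] => 0
  | n, x :: xs =>
    if PySem.Str.count x "." = 1 then
      (if n ≤ 1 then 0 else cpCut (n - 1) xs + 1)
    else cpCut n xs + 1

-- the index list B builds, started at s
def cpDots (l : List String) (s : Int) : List Int :=
  ((PySem.List.enumerate l s).filter (fun q => PySem.Str.count q.2 "." = 1)).map Prod.fst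

theorem cpLoop_eq_take (l : List String) : ∀ (n : Nat) (h : List String), 1 ≤ n → n ≤ 5 →
    cpLoop l (5 - (n : Int)) h = h ++ l.take (cpCut n l) ++ ["."] := by
  induction l with
  | nil => intro n h _ _; simp [cpLoop, cpCut]
  | cons x xs ih =>
    intro n h h1 h5
    show (if PySem.Str.count x "." = 1 then
      if (5 - (n : Int)) + 1 = 5 then h ++ ["."]
      else cpLoop xs ((5 - (n : Int)) + 1) (h ++ [x])
    else cpLoop xs (5 - (n : Int)) (h ++ [x]))
      = h ++ (x :: xs).take (cpCut n (x :: xs)) ++ ["."]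
    by_cases hp : PySem.Str.count x "." = 1
    · rw [if_pos hp]
      by_cases hn1 : n = 1
      · subst hn1
        rw [if_pos (by norm_num)]
        have : cpCut 1 (x :: xs) = 0 := by
          simp only [cpCut]; rw [if_pos hp, if_pos (le_refl 1)]
        rw [this]; simp
      · have hcast : (5 : Int) - (n : Int) + 1 = 5 - ((n - 1 : Nat) : Int) := by
          have : ((n - 1 : Nat) : Int) = (n : Int) - 1 := by omega
          omega
        rw [if_neg (by omega), hcast, ih (n - 1) (h ++ [x]) (by omega) (by omega)]
        have : cpCut n (x :: xs) = cpCut (n - 1) xs + 1 := by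
          simp only [cpCut]; rw [if_pos hp, if_neg (show ¬ n ≤ 1 by omega)]
        rw [this, List.take_succ_cons]
        simp
    · rw [if_neg hp, ih n (h ++ [x]) h1 h5]
      have : cpCut n (x :: xs) = cpCut n xs + 1 := by simp only [cpCut]; rw [if_neg hp]
      rw [this, List.take_succ_cons]
      simp

theorem dots_getD (l : List String) : ∀ (s : Int) (n : Nat), 1 ≤ n →
    (if n ≤ (cpDots l s).length then (cpDots l s).getD (n - 1) 0 else s + (l.length : Int))
      = s + (cpCut n l : Int) := by
  induction l with
  | nil =>
    intro s n h1
    rw [if_neg]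
    · simp [cpCut]
    · simp [cpDots, PySem.List.enumerate_nil]; omega
  | cons x xs ih =>
    intro s n h1
    have hrec : cpDots (x :: xs) s =
        (if PySem.Str.count x "." = 1 then [s] else []) ++ cpDots xs (s + 1) := by
      simp only [cpDots, PySem.List.enumerate_cons, List.filter_cons]
      by_cases hp : PySem.Str.count x "." = 1
      · rw [if_pos (by simp only [decide_eq_true_eq]; exact hp), if_pos hp]; simp
      · rw [if_neg (by simp only [decide_eq_true_eq]; exact hp), if_neg hp]; simp
    by_cases hp : PySem.Str.count x "." = 1
    · rw [hrec, if_pos hp]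
      have hcx : cpCut n (x :: xs) = if n ≤ 1 then 0 else cpCut (n - 1) xs + 1 := by
        simp only [cpCut]; rw [if_pos hp]
      by_cases hn1 : n = 1
      · subst hn1
        rw [if_pos (by simp)]
        simp [hcx]
      · have hn2 : 2 ≤ n := by omega
        have ihn := ih (s + 1) (n - 1) (by omega)
        have hgetD : ([s] ++ cpDots xs (s + 1)).getD (n - 1) 0
            = (cpDots xs (s + 1)).getD (n - 1 - 1) 0 := by
          have : n - 1 = (n - 2) + 1 := by omega
          rw [this]; simp [List.getD]
        by_cases hc : n - 1 ≤ (cpDots xs (s + 1)).length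
        · rw [if_pos (by simp; omega), hgetD]
          rw [if_pos hc] at ihn
          rw [ihn, hcx, if_neg (show ¬ n ≤ 1 by omega)]
          push_cast; ring
        · rw [if_neg (by simp; omega)]
          rw [if_neg hc] at ihn
          have : s + ((x :: xs).length : Int) = (s + 1) + (xs.length : Int) := by
            simp; ring
          rw [this, ihn, hcx, if_neg (show ¬ n ≤ 1 by omega)]
          push_cast; ring
    · rw [hrec, if_neg hp]
      have hcx : cpCut n (x :: xs) = cpCut n xs + 1 := by
        simp only [cpCut]; rw [if_neg hp]
      have ihn := ih (s + 1) n h1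
      have : s + ((x :: xs).length : Int) = (s + 1) + (xs.length : Int) := by simp; ring
      simp only [List.nil_append, this, ihn, hcx]
      push_cast; ring

-- ===== VERDICT (by name: the statement is the Claim_ definition above) =====
theorem contar_puntos_spec : Claim_equal_contar_puntos := by
  intro entrada _
  have hA := cpLoop_eq_take entrada 5 [] (by omega) (le_refl 5)
  norm_num at hA
  have hd := dots_getD entrada 0 5 (by omega)
  norm_num at hd
  show cpLoop entrada 0 [] =
    PySem.List.slice entrada none
      (some (if 5 ≤ (cpDots entrada 0).length then (cpDots entrada 0).getD 4 0
             else (entrada.length : Int))) ++ ["."]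
  simp only [List.getD_eq_getElem?_getD]
  rw [hA, hd, PySem.List.slice_to_natCast]
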